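-- pv_equiv track=rewrite | github.com/prasadbobby/psychic-octo-fortnight | backend/agents/path_generator.py | _get_fallback_topics
-- ===== SOURCE A (Python) =====
-- from typing import List
--
-- def _get_fallback_topics(subject: str, weak_areas: List[str]) -> List[str]:
--     """Fallback topic sequences"""
--
--     topic_sequences = {
--         'algebra': [
--             'Variables and Expressions',
--             'Linear Equations',
--             'Systems of Equations',
--             'Quadratic Functions',
--             'Polynomial Operations'
--         ],
--         'geometry': [
--             'Basic Shapes and Properties',
--             'Angles and Triangles',
--             'Area and Perimeter',
--             'Circle Geometry',
--             '3D Shapes and Volume'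
--         ],
--         'trigonometry': [
--             'Introduction to Trigonometry',
--             'Sine, Cosine, and Tangent',
--             'Unit Circle',
--             'Trigonometric Identities',
--             'Applications of Trigonometry'
--         ],
--         'calculus': [
--             'Limits and Continuity',
--             'Introduction to Derivatives',
--             'Applications of Derivatives',
--             'Introduction to Integrals',
--             'Applications of Integration'
--         ]
--     }
--
--     base_topics = topic_sequences.get(subject.lower(), topic_sequences['algebra'])
--
--     # Prioritize weak areas
--     if weak_areas:
--         prioritized_topics = []
--         for weak_area in weak_areas:
--             for topic in base_topics:
--                 if weak_area.lower() in topic.lower() and topic not in prioritized_topics: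
--                     prioritized_topics.append(topic)
--
--         # Add remaining topics
--         for topic in base_topics:
--             if topic not in prioritized_topics:
--                 prioritized_topics.append(topic)
--
--         return prioritized_topics[:5]
--
--     return base_topics[:5]
-- ===== SOURCE B (Python) =====
-- from typing import List
--
-- _TOPIC_SEQUENCES = {
--     'algebra': [
--         'Variables and Expressions',
--         'Linear Equations',
--         'Systems of Equations',
--         'Quadratic Functions',
--         'Polynomial Operations'
--     ],
--     'geometry': [
--         'Basic Shapes and Properties',
--         'Angles and Triangles',
--         'Area and Perimeter',
--         'Circle Geometry',
--         '3D Shapes and Volume'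
--     ],
--     'trigonometry': [
--         'Introduction to Trigonometry',
--         'Sine, Cosine, and Tangent',
--         'Unit Circle',
--         'Trigonometric Identities',
--         'Applications of Trigonometry'
--     ],
--     'calculus': [
--         'Limits and Continuity',
--         'Introduction to Derivatives',
--         'Applications of Derivatives',
--         'Introduction to Integrals',
--         'Applications of Integration'
--     ]
-- }
--
-- def _get_fallback_topics(subject: str, weak_areas: List[str]) -> List[str]:
--     """Fallback topic sequences, prioritized by a single stable sort."""
--     base_topics = _TOPIC_SEQUENCES.get(subject.lower(), _TOPIC_SEQUENCES['algebra'])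
--
--     def priority(topic: str) -> int:
--         topic_lower = topic.lower()
--         return next((i for i, w in enumerate(weak_areas) if w.lower() in topic_lower),
--                     len(weak_areas))
--
--     return sorted(base_topics, key=priority)[:5]
-- ===== Notes on version B (the rewrite author's own statement) =====
-- stated objective: simpler
-- what changed: Replaces A's three accumulation loops (one pass per weak area with a membership test on the growing result, plus a final remaining-topics pass) by a single stable sort of the base topic list keyed on the index of the first matching weak area (len(weak_areas) if none), then [:5].
import Mathlib
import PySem

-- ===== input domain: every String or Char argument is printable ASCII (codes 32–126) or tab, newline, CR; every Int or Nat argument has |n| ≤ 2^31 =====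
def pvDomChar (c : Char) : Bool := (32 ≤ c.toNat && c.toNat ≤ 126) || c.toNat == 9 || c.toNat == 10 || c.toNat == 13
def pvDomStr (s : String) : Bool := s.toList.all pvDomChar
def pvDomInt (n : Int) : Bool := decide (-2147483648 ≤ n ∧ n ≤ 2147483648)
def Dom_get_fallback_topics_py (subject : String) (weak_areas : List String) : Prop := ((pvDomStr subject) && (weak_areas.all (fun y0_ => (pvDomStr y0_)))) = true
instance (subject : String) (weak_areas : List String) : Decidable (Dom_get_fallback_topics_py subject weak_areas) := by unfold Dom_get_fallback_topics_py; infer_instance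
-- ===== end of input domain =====

-- B replaces A's three accumulation loops (one pass per weak area with a membership test on the
-- growing result, plus a remaining-topics pass) by a single stable sort of the base list keyed
-- on the index of the first matching weak area; objective: simpler.

-- ===== PORT A =====
def pvTableA : PySem.Dict String (List String) := PySem.Dict.ofList [
  ("algebra", ["Variables and Expressions", "Linear Equations", "Systems of Equations",
               "Quadratic Functions", "Polynomial Operations"]),
  ("geometry", ["Basic Shapes and Properties", "Angles and Triangles", "Area and Perimeter",
                "Circle Geometry", "3D Shapes and Volume"]),
  ("trigonometry", ["Introduction to Trigonometry", "Sine, Cosine, and Tangent", "Unit Circle",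
                    "Trigonometric Identities", "Applications of Trigonometry"]),
  ("calculus", ["Limits and Continuity", "Introduction to Derivatives", "Applications of Derivatives",
                "Introduction to Integrals", "Applications of Integration"])]

def get_fallback_topics_py (subject : String) (weak_areas : List String) : List String :=
  -- 'algebra' is a key of the literal dict, so getD with default [] is exact for topic_sequences['algebra']
  let base_topics := PySem.Dict.getD pvTableA (PySem.Str.lower subject)
                       (PySem.Dict.getD pvTableA "algebra" [])
  if !weak_areas.isEmpty then
    let prioritized := weak_areas.foldl (fun pri w =>
      base_topics.foldl (fun pri t =>
        if PySem.Str.isIn (PySem.Str.lower w) (PySem.Str.lower t) && !(pri.contains t)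
        then pri ++ [t] else pri) pri) []
    let prioritized := base_topics.foldl (fun pri t =>
        if !(pri.contains t) then pri ++ [t] else pri) prioritized
    PySem.List.slice prioritized none (some 5)
  else
    PySem.List.slice base_topics none (some 5)

-- ===== PORT B =====
def pvTableB : PySem.Dict String (List String) := PySem.Dict.ofList [
  ("algebra", ["Variables and Expressions", "Linear Equations", "Systems of Equations",
               "Quadratic Functions", "Polynomial Operations"]),
  ("geometry", ["Basic Shapes and Properties", "Angles and Triangles", "Area and Perimeter",
                "Circle Geometry", "3D Shapes and Volume"]),
  ("trigonometry", ["Introduction to Trigonometry", "Sine, Cosine, and Tangent", "Unit Circle",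
                    "Trigonometric Identities", "Applications of Trigonometry"]),
  ("calculus", ["Limits and Continuity", "Introduction to Derivatives", "Applications of Derivatives",
                "Introduction to Integrals", "Applications of Integration"])]

-- Source B's substring test: w.lower() in topic.lower()
def pvCond (w t : String) : Bool := PySem.Str.isIn (PySem.Str.lower w) (PySem.Str.lower t)

-- Source B's `priority`: index of the first weak area matching the topic (next(...) over
-- enumerate), or len(weak_areas) if none matches
def pvPriority (weak_areas : List String) (topic : String) : Nat :=
  (weak_areas.findIdx? (fun w => pvCond w topic)).getD weak_areas.length

def get_fallback_topics_py_alt (subject : String) (weak_areas : List String) : List String :=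
  let base_topics := PySem.Dict.getD pvTableB (PySem.Str.lower subject)
                       (PySem.Dict.getD pvTableB "algebra" [])
  PySem.List.slice (PySem.List.sorted base_topics (fun t => pvPriority weak_areas t) false)
    none (some 5)

-- ===== PRECONDITION & SPEC =====
def Spec_get_fallback_topics_py (subject : String) (weak_areas : List String) (out : List String) : Prop := out = get_fallback_topics_py_alt subject weak_areas
instance (subject : String) (weak_areas : List String) (out : List String) : Decidable (Spec_get_fallback_topics_py subject weak_areas out) := by unfold Spec_get_fallback_topics_py; infer_instance

-- ===== CLAIM (what is proved, stated in full; the proofs are below) =====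
def Claim_equal_get_fallback_topics_py : Prop := ∀ (subject : String) (weak_areas : List String), Dom_get_fallback_topics_py subject weak_areas → Spec_get_fallback_topics_py subject weak_areas (get_fallback_topics_py subject weak_areas)

-- ===== LEMMAS AND PROOFS =====

theorem pvFindIdxD_le {α : Type} (p : α → Bool) (l : List α) :
    (List.findIdx? p l).getD l.length ≤ l.length := by
  cases h : List.findIdx? p l with
  | none => simp
  | some i =>
    have := (List.findIdx?_eq_some_iff_findIdx_eq.mp h).1
    simpa using Nat.le_of_lt this

theorem pvPriority_le (weak : List String) (t : String) :
    pvPriority weak t ≤ weak.length := pvFindIdxD_le _ _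

theorem pvPriority_append (ws : List String) (w t : String) :
    pvPriority (ws ++ [w]) t =
      if pvPriority ws t < ws.length then pvPriority ws t
      else if pvCond w t then ws.length else ws.length + 1 := by
  unfold pvPriority
  rw [List.findIdx?_append]
  cases h : ws.findIdx? (fun w => pvCond w t) with
  | none =>
    by_cases hc : pvCond w t <;> simp [List.findIdx?_cons, hc]
  | some i =>
    have := (List.findIdx?_eq_some_iff_findIdx_eq.mp h).1
    simp [Option.or]
    omega

def pvGroups (weak base : List String) (n : Nat) : List String :=
  (List.range n).flatMap (fun j => base.filter (fun t => pvPriority weak t == j))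

theorem mem_pvGroups (weak base : List String) (n : Nat) (t : String) :
    t ∈ pvGroups weak base n ↔ t ∈ base ∧ pvPriority weak t < n := by
  unfold pvGroups
  simp only [List.mem_flatMap, List.mem_filter, List.mem_range, beq_iff_eq]
  constructor
  · rintro ⟨j, hj, ht, rfl⟩; exact ⟨ht, hj⟩
  · rintro ⟨ht, hk⟩; exact ⟨_, hk, ht, rfl⟩

theorem pvInner (p : String → Bool) (base : List String) (hnd : base.Nodup) :
    ∀ P : List String,
    base.foldl (fun pri t => if p t && !(pri.contains t) then pri ++ [t] else pri) P
      = P ++ base.filter (fun t => p t && !(P.contains t)) := by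
  induction base with
  | nil => intro P; simp
  | cons x rest ih =>
    intro P
    have hx : x ∉ rest := (List.nodup_cons.mp hnd).1
    have hr : rest.Nodup := (List.nodup_cons.mp hnd).2
    simp only [List.foldl_cons]
    by_cases hc : (p x && !(P.contains x)) = true
    · rw [if_pos hc, ih hr (P ++ [x])]
      have heq : rest.filter (fun t => p t && !((P ++ [x]).contains t))
           = rest.filter (fun t => p t && !(P.contains t)) := by
        apply List.filter_congr
        intro t ht
        have hne : t ≠ x := by rintro rfl; exact hx ht
        simp [hne]
      rw [heq]
      have hpx : p x = true := by
        cases hpx : p x <;> simp [hpx] at hc ⊢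
      have hxP : x ∉ P := by
        intro hmem
        simp [List.contains_eq_mem, hmem, hpx] at hc
      rw [List.filter_cons, if_pos (by simp [List.contains_eq_mem, hpx, hxP])]
      simp
    · rw [if_neg hc, ih hr P]
      simp only [List.filter_cons]
      rw [if_neg hc]

theorem pvBeqCongr {a b j : Nat} (h : a = j ↔ b = j) : (a == j) = (b == j) := by
  by_cases h1 : a = j
  · simp [h1, h.mp h1]
  · have h2 : ¬ b = j := fun hb => h1 (h.mpr hb)
    simp [h1, h2]

theorem pvFibre_congr (ws : List String) (w : String) (base : List String) (j : Nat)
    (hj : j < ws.length) :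
    base.filter (fun t => pvPriority (ws ++ [w]) t == j)
      = base.filter (fun t => pvPriority ws t == j) := by
  apply List.filter_congr
  intro t _
  apply pvBeqCongr
  have hle := pvPriority_le ws t
  rw [pvPriority_append]
  split_ifs with h1 h2 <;> omega

theorem pvGroups_append_w (ws : List String) (w : String) (base : List String) :
    pvGroups (ws ++ [w]) base ws.length = pvGroups ws base ws.length := by
  unfold pvGroups
  apply List.flatMap_congr
  intro j hj
  exact pvFibre_congr ws w base j (List.mem_range.mp hj)

theorem pvGroups_succ (weak base : List String) (n : Nat) :
    pvGroups weak base (n + 1)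
      = pvGroups weak base n ++ base.filter (fun t => pvPriority weak t == n) := by
  unfold pvGroups
  rw [List.range_succ]
  simp

theorem pvOuter (base : List String) (hnd : base.Nodup) (weak : List String) :
    weak.foldl (fun pri w =>
      base.foldl (fun pri t =>
        if pvCond w t && !(pri.contains t) then pri ++ [t] else pri) pri) []
      = pvGroups weak base weak.length := by
  induction weak using List.reverseRecOn with
  | nil => simp [pvGroups]
  | append_singleton ws w ih =>
    rw [List.foldl_append]
    simp only [List.foldl_cons, List.foldl_nil]
    rw [ih, pvInner (pvCond w) base hnd (pvGroups ws base ws.length)]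
    have hlen : (ws ++ [w]).length = ws.length + 1 := by simp
    rw [hlen, pvGroups_succ, pvGroups_append_w]
    congr 1
    apply List.filter_congr
    intro t ht
    have hle := pvPriority_le ws t
    rw [pvPriority_append]
    by_cases hin : t ∈ pvGroups ws base ws.length
    · have hlt : pvPriority ws t < ws.length := ((mem_pvGroups ws base ws.length t).mp hin).2
      rw [if_pos hlt]
      simp [hin, Nat.ne_of_lt hlt]
    · have hnlt : ¬ pvPriority ws t < ws.length :=
        fun hlt => hin ((mem_pvGroups ws base ws.length t).mpr ⟨ht, hlt⟩)
      rw [if_neg hnlt]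
      by_cases hcw : pvCond w t <;> simp [hcw, hin]

theorem pvRemaining (base : List String) (hnd : base.Nodup) (weak : List String) :
    base.foldl (fun pri t => if !(pri.contains t) then pri ++ [t] else pri)
        (pvGroups weak base weak.length)
      = pvGroups weak base (weak.length + 1) := by
  have h1 :
      base.foldl (fun pri t => if !(pri.contains t) then pri ++ [t] else pri)
          (pvGroups weak base weak.length)
        = base.foldl (fun pri t =>
            if (fun _ : String => true) t && !(pri.contains t) then pri ++ [t] else pri)
          (pvGroups weak base weak.length) := by
    apply PySem.List.foldl_congr_mem
    intro acc x _
    simp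
  rw [h1, pvInner _ base hnd _, pvGroups_succ]
  congr 1
  apply List.filter_congr
  intro t ht
  have hle := pvPriority_le weak t
  by_cases hin : t ∈ pvGroups weak base weak.length
  · have hlt : pvPriority weak t < weak.length := ((mem_pvGroups weak base weak.length t).mp hin).2
    simp [hin, Nat.ne_of_lt hlt]
  · have hnlt : ¬ pvPriority weak t < weak.length :=
      fun hlt => hin ((mem_pvGroups weak base weak.length t).mpr ⟨ht, hlt⟩)
    have hpe : pvPriority weak t = weak.length := by omega
    simp [hin, hpe]


theorem pvInsertBy_cons (before : String → String → Bool) (x y : String) (ys : List String) :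
    PySem.List.insertBy before x (y :: ys)
      = if before x y then x :: y :: ys else y :: PySem.List.insertBy before x ys := rfl

theorem pvInsertBy_append (before : String → String → Bool) (x : String) :
    ∀ l1 l2 : List String, (∀ y ∈ l1, before x y = false) →
    PySem.List.insertBy before x (l1 ++ l2) = l1 ++ PySem.List.insertBy before x l2 := by
  intro l1
  induction l1 with
  | nil => intro l2 _; simp
  | cons y t ih =>
    intro l2 h
    rw [List.cons_append, pvInsertBy_cons, if_neg (by simp [h y (by simp)]),
        ih l2 (fun z hz => h z (by simp [hz]))]
    rfl

theorem pvInsertBy_all_before (before : String → String → Bool) (x : String)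
    (l : List String) (h : ∀ y ∈ l, before x y = true) :
    PySem.List.insertBy before x l = x :: l := by
  cases l with
  | nil => rfl
  | cons y t => rw [pvInsertBy_cons, if_pos (h y (by simp))]

theorem pvSorted_groups (key : String → Nat) (n : Nat) :
    ∀ xs : List String, (∀ x ∈ xs, key x ≤ n) →
    PySem.List.sorted xs key false
      = (List.range (n + 1)).flatMap (fun j => xs.filter (fun x => key x == j)) := by
  intro xs
  induction xs using List.reverseRecOn with
  | nil => intro _; simp [PySem.List.sorted]
  | append_singleton xs x ih =>
    intro hb
    have hxs : ∀ y ∈ xs, key y ≤ n := fun y hy => hb y (List.mem_append_left _ hy)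
    have hkx : key x ≤ n := hb x (by simp)
    rw [PySem.List.sorted_eq_foldl_insertBy, List.foldl_append]
    simp only [List.foldl_cons, List.foldl_nil]
    rw [← PySem.List.sorted_eq_foldl_insertBy, ih hxs]
    have hsplit : n + 1 = (key x + 1) + (n - key x) := by omega
    rw [hsplit, List.range_add, List.flatMap_append, List.flatMap_append]
    rw [pvInsertBy_append _ _ _ _ (by
      intro y hy
      simp only [List.mem_flatMap, List.mem_range, List.mem_filter, beq_iff_eq] at hy
      obtain ⟨j, hj, _, hkey⟩ := hy
      simp only [decide_eq_false_iff_not, not_lt]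
      omega)]
    rw [pvInsertBy_all_before _ _ _ (by
      intro y hy
      simp only [List.mem_flatMap, List.mem_map, List.mem_range, List.mem_filter,
        beq_iff_eq] at hy
      obtain ⟨j, ⟨i, hi, rfl⟩, _, hkey⟩ := hy
      simp only [decide_eq_true_eq]
      omega)]
    have hG2 : ((List.range (n - key x)).map (fun i => key x + 1 + i)).flatMap
          (fun j => (xs ++ [x]).filter (fun y => key y == j))
        = ((List.range (n - key x)).map (fun i => key x + 1 + i)).flatMap
          (fun j => xs.filter (fun y => key y == j)) := by
      apply List.flatMap_congr
      intro j hj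
      simp only [List.mem_map, List.mem_range] at hj
      obtain ⟨i, hi, rfl⟩ := hj
      rw [List.filter_append]
      have hx0 : [x].filter (fun y => key y == key x + 1 + i) = [] := by
        simp only [List.filter_cons, List.filter_nil, beq_iff_eq]
        rw [if_neg (by omega)]
      rw [hx0, List.append_nil]
    rw [hG2]
    rw [List.range_succ, List.flatMap_append, List.flatMap_append]
    have hG1 : (List.range (key x)).flatMap (fun j => (xs ++ [x]).filter (fun y => key y == j))
        = (List.range (key x)).flatMap (fun j => xs.filter (fun y => key y == j)) := by
      apply List.flatMap_congr
      intro j hj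
      have hjlt : j < key x := List.mem_range.mp hj
      rw [List.filter_append]
      have hx0 : [x].filter (fun y => key y == j) = [] := by
        simp only [List.filter_cons, List.filter_nil, beq_iff_eq]
        rw [if_neg (by omega)]
      rw [hx0, List.append_nil]
    rw [hG1]
    have hGx : [key x].flatMap (fun j => (xs ++ [x]).filter (fun y => key y == j))
        = [key x].flatMap (fun j => xs.filter (fun y => key y == j)) ++ [x] := by
      simp only [List.flatMap_cons, List.flatMap_nil, List.append_nil, List.filter_append]
      have hx1 : [x].filter (fun y => key y == key x) = [x] := by
        simp
      rw [hx1]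
    rw [hGx]
    simp [List.append_assoc]

theorem pvPairwise_total {α : Type} (R : α → α → Prop) (h : ∀ a b, R a b) :
    ∀ l : List α, l.Pairwise R := by
  intro l
  induction l with
  | nil => simp
  | cons x t ih => exact List.Pairwise.cons (fun y _ => h x y) ih

-- the resolved base list is always one of the four literal sequences, hence duplicate-free
theorem pvBase_nodup (subject : String) :
    (PySem.Dict.getD pvTableA (PySem.Str.lower subject)
      (PySem.Dict.getD pvTableA "algebra" [])).Nodup := by
  have h : pvTableA = PySem.Dict.mk [
    ("algebra", ["Variables and Expressions", "Linear Equations", "Systems of Equations",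
                 "Quadratic Functions", "Polynomial Operations"]),
    ("geometry", ["Basic Shapes and Properties", "Angles and Triangles", "Area and Perimeter",
                  "Circle Geometry", "3D Shapes and Volume"]),
    ("trigonometry", ["Introduction to Trigonometry", "Sine, Cosine, and Tangent", "Unit Circle",
                      "Trigonometric Identities", "Applications of Trigonometry"]),
    ("calculus", ["Limits and Continuity", "Introduction to Derivatives", "Applications of Derivatives",
                  "Introduction to Integrals", "Applications of Integration"])] := rfl
  rw [PySem.Dict.getD_eq_get?_getD, h]
  simp only [PySem.Dict.get?_mk_cons]
  split_ifs <;> try decide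
  rw [show (PySem.Dict.mk ([] : List (String × List String))).get?
        (PySem.Str.lower subject) = none from rfl]
  decide

-- ===== VERDICT (by name: the statement is the Claim_ definition above) =====
theorem get_fallback_topics_py_spec : Claim_equal_get_fallback_topics_py := by
  unfold Claim_equal_get_fallback_topics_py
  intro subject weak _
  unfold Spec_get_fallback_topics_py get_fallback_topics_py get_fallback_topics_py_alt
  have htbl : pvTableB = pvTableA := rfl
  rw [htbl]
  dsimp only
  set base := PySem.Dict.getD pvTableA (PySem.Str.lower subject)
      (PySem.Dict.getD pvTableA "algebra" []) with hbase
  have hnd : base.Nodup := by rw [hbase]; exact pvBase_nodup subject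
  cases hw : weak.isEmpty
  case false =>
    rw [if_pos (by simp)]
    congr 1
    have hA : weak.foldl (fun pri w =>
        base.foldl (fun pri t =>
          if PySem.Str.isIn (PySem.Str.lower w) (PySem.Str.lower t) && !(pri.contains t)
          then pri ++ [t] else pri) pri) []
        = pvGroups weak base weak.length := pvOuter base hnd weak
    rw [hA, pvRemaining base hnd weak]
    have hB : PySem.List.sorted base (fun t => pvPriority weak t) false
        = (List.range (weak.length + 1)).flatMap
            (fun j => base.filter (fun t => pvPriority weak t == j)) :=
      pvSorted_groups (fun t => pvPriority weak t) weak.length base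
        (fun x _ => pvPriority_le weak x)
    rw [hB]
    rfl
  case true =>
    have hwe : weak = [] := List.isEmpty_iff.mp hw
    subst hwe
    rw [if_neg (by simp)]
    congr 1
    exact (PySem.List.sorted_eq_self_of_pairwise base (fun t => pvPriority [] t)
      (pvPairwise_total (fun a b : String => pvPriority [] a ≤ pvPriority [] b)
        (fun a b => by simp [pvPriority]) base)).symm
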